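-- pv_equiv track=rewrite | github.com/AppraiseDev/Appraise | Campaign/management/commands/InitCampaignWMT19DocSrcDACrowd2.py | _create_uniform_task_map
-- ===== SOURCE A (Python) =====
-- def _create_uniform_task_map(annotators, tasks, redudancy):
--     """
--     Creates task maps, uniformly distributed across given annotators.
--     """
--     _total_tasks = tasks * redudancy
--     if annotators == 0 or _total_tasks % annotators > 0:
--         return None
--
--     _tasks_per_annotator = _total_tasks // annotators
--
--     _results = []
--     _current_task_id = 0
--     for annotator_id in range(annotators):
--         _annotator_tasks = []
--         for annotator_task in range(_tasks_per_annotator):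
--             task_id = (_current_task_id + annotator_task) % tasks
--             _annotator_tasks.append(task_id)
--             _current_task_id = task_id
--         _current_task_id += 1
--         _results.append(tuple(_annotator_tasks))
--
--     return _results
-- ===== SOURCE B (Python) =====
-- def _create_uniform_task_map(annotators, tasks, redudancy):
--     """
--     Creates task maps, uniformly distributed across given annotators.
--     """
--     total_tasks = tasks * redudancy
--     if annotators == 0 or total_tasks % annotators > 0:
--         return None
--
--     n = total_tasks // annotators  # tasks per annotator
--     if n <= 0:
--         return [() for _ in range(annotators)]
--
--     # Closed form: annotator j's k-th task is (j*(T+1) + k*(k+1)//2) % tasks,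
--     # where T = (n-1)*n//2 is the triangular advance between annotators.
--     step = (n - 1) * n // 2 + 1
--     return [
--         tuple((j * step + k * (k + 1) // 2) % tasks for k in range(n))
--         for j in range(annotators)
--     ]
-- ===== Notes on version B (the rewrite author's own statement) =====
-- stated objective: alternative
-- what changed: Replaces the stateful nested loop (running task-id counter threaded through both loops) by a closed-form expression: annotator j's k-th task id is (j*step + k*(k+1)//2) % tasks with step = (n-1)*n//2 + 1, so the whole map is two independent comprehensions with no carried state.
import Mathlib
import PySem

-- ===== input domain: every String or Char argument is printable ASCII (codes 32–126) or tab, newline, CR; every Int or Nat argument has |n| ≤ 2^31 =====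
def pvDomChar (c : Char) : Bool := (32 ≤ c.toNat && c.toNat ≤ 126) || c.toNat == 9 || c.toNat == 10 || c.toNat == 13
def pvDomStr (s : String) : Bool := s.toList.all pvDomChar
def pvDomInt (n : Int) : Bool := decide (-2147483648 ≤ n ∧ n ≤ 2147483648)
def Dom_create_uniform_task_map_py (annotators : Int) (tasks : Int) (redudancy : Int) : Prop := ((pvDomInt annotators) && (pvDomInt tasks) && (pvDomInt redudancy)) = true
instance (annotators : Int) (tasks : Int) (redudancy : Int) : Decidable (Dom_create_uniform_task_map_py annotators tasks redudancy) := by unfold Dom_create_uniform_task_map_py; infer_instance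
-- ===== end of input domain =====

-- B replaces A's stateful nested loop by a closed-form per-(annotator, slot) expression; equivalence of the two is proved below (return values only).

-- ===== PORT A =====
-- inner loop body: task_id = (cur + k) % tasks; append; cur = task_id
def pvAInner (tasks : Int) (st : List Int × Int) (k : Int) : List Int × Int :=
  let task_id := PySem.Int.mod (st.2 + k) tasks
  (st.1 ++ [task_id], task_id)

-- outer loop body: run the inner loop from the current counter, then cur += 1
def pvAOuter (tasks n : Int) (st : List (List Int) × Int) (_annotator_id : Int) : List (List Int) × Int :=
  let inner := (PySem.List.pyRange 0 n 1).foldl (pvAInner tasks) ([], st.2)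
  (st.1 ++ [inner.1], inner.2 + 1)

def create_uniform_task_map_py (annotators : Int) (tasks : Int) (redudancy : Int) : Option (List (List Int)) :=
  let total := tasks * redudancy
  if annotators = 0 then none
  else if 0 < PySem.Int.mod total annotators then none
  else
    let n := PySem.Int.floordiv total annotators
    some (((PySem.List.pyRange 0 annotators 1).foldl (pvAOuter tasks n) ([], 0)).1)

-- ===== PORT B =====
-- one annotator's row: [(base + k*(k+1)//2) % tasks for k in range(n)]
def pvBRow (tasks n base : Int) : List Int :=
  (PySem.List.pyRange 0 n 1).map
    (fun k => PySem.Int.mod (base + PySem.Int.floordiv (k * (k + 1)) 2) tasks)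

def create_uniform_task_map_py_alt (annotators : Int) (tasks : Int) (redudancy : Int) : Option (List (List Int)) :=
  let total := tasks * redudancy
  if annotators = 0 then none
  else if 0 < PySem.Int.mod total annotators then none
  else
    let n := PySem.Int.floordiv total annotators
    if n ≤ 0 then some ((PySem.List.pyRange 0 annotators 1).map (fun _ => []))
    else
      let step := PySem.Int.floordiv ((n - 1) * n) 2 + 1
      some ((PySem.List.pyRange 0 annotators 1).map (fun j => pvBRow tasks n (j * step)))

-- ===== PRECONDITION & SPEC =====
def Spec_create_uniform_task_map_py (annotators : Int) (tasks : Int) (redudancy : Int) (out : Option (List (List Int))) : Prop := out = create_uniform_task_map_py_alt annotators tasks redudancy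
instance (annotators : Int) (tasks : Int) (redudancy : Int) (out : Option (List (List Int))) : Decidable (Spec_create_uniform_task_map_py annotators tasks redudancy out) := by unfold Spec_create_uniform_task_map_py; infer_instance

-- ===== CLAIM (what is proved, stated in full; the proofs are below) =====
def Claim_equal_create_uniform_task_map_py : Prop := ∀ (annotators : Int) (tasks : Int) (redudancy : Int), Dom_create_uniform_task_map_py annotators tasks redudancy → Spec_create_uniform_task_map_py annotators tasks redudancy (create_uniform_task_map_py annotators tasks redudancy)

-- ===== LEMMAS AND PROOFS =====

-- Python's floor-mod absorbs an inner floor-mod by the same modulus (also trivially for modulus 0).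
theorem pvMod_mod_add (t x a : Int) :
    PySem.Int.mod (PySem.Int.mod x t + a) t = PySem.Int.mod (x + a) t := by
  simp [PySem.Int.mod]

-- triangular-number step: T(m-1) + m = T(m)
theorem pvTri_step (m : Nat) :
    PySem.Int.floordiv (((m : Int) - 1) * m) 2 + m
      = PySem.Int.floordiv ((m : Int) * (m + 1)) 2 := by
  rw [PySem.Int.floordiv_eq_ediv_of_pos (by norm_num : (0:Int) < 2),
      PySem.Int.floordiv_eq_ediv_of_pos (by norm_num : (0:Int) < 2)]
  have h2 : (m : Int) * (m + 1) = ((m : Int) - 1) * m + (m : Int) * 2 := by ring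
  rw [h2, Int.add_mul_ediv_right _ _ (by norm_num : (2:Int) ≠ 0)]

-- the inner loop in closed form: the produced row and the final counter
theorem pvInner_eq (t c : Int) (m : Nat) :
    (PySem.List.pyRange 0 (m : Int) 1).foldl (pvAInner t) ([], c)
      = (pvBRow t (m : Int) c,
         if m = 0 then c
         else PySem.Int.mod (c + PySem.Int.floordiv (((m : Int) - 1) * m) 2) t) := by
  induction m with
  | zero => simp [PySem.List.pyRange_one_eq_nil le_rfl, pvBRow]
  | succ m ih =>
    have hr : PySem.List.pyRange 0 ((m : Int) + 1) 1
        = PySem.List.pyRange 0 (m : Int) 1 ++ [(m : Int)] :=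
      PySem.List.pyRange_one_succ_right (by exact_mod_cast Nat.zero_le m)
    have hrow : pvBRow t ((m : Int) + 1) c
        = pvBRow t (m : Int) c
          ++ [PySem.Int.mod (c + PySem.Int.floordiv ((m : Int) * ((m : Int) + 1)) 2) t] := by
      simp [pvBRow, hr]
    have hT : PySem.Int.floordiv (((m : Int) + 1 - 1) * ((m : Int) + 1)) 2
        = PySem.Int.floordiv ((m : Int) * ((m : Int) + 1)) 2 := by
      congr 1; ring
    push_cast
    rw [hr, List.foldl_append, ih, hT, hrow]
    simp only [List.foldl_cons, List.foldl_nil, pvAInner]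
    by_cases hm : m = 0
    · subst hm
      simp [pvBRow, PySem.List.pyRange_one_eq_nil (le_refl (0:Int))]
    · rw [if_neg hm]
      have habs : PySem.Int.mod
          (PySem.Int.mod (c + PySem.Int.floordiv (((m : Int) - 1) * m) 2) t + (m : Int)) t
          = PySem.Int.mod (c + PySem.Int.floordiv ((m : Int) * ((m : Int) + 1)) 2) t := by
        rw [pvMod_mod_add, add_assoc, pvTri_step]
      simp only [Prod.mk.injEq]
      exact ⟨by rw [habs], habs⟩

-- degenerate case: when tasks_per_annotator ≤ 0, every row is empty
theorem pvOuter_nil (t n : Int) (hn : n ≤ 0) (l : List Int) :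
    ∀ (acc : List (List Int)) (c : Int),
      (l.foldl (pvAOuter t n) (acc, c)).1 = acc ++ l.map (fun _ => []) := by
  induction l with
  | nil => intro acc c; simp
  | cons x xs ih =>
    intro acc c
    simp only [List.foldl_cons, pvAOuter, PySem.List.pyRange_one_eq_nil hn,
      List.foldl_nil, List.map_cons]
    rw [ih]
    simp

-- the outer loop in closed form (each row depends only on the start counter modulo t)
theorem pvOuter_eq (t n step : Int)
    (hstep : step = PySem.Int.floordiv ((n - 1) * n) 2 + 1) (hn : 0 < n) (l : List Int) :
    ∀ (acc : List (List Int)) (c : Int),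
      (l.foldl (pvAOuter t n) (acc, c)).1
        = acc ++ (List.range l.length).map (fun j : Nat => pvBRow t n (c + (j : Int) * step)) := by
  have hcast : ((n.toNat : Int)) = n := Int.toNat_of_nonneg hn.le
  have hne : n.toNat ≠ 0 := by omega
  induction l with
  | nil => intro acc c; simp
  | cons x xs ih =>
    intro acc c
    have hone : pvAOuter t n (acc, c) x
        = (acc ++ [pvBRow t n c],
           PySem.Int.mod (c + PySem.Int.floordiv ((n - 1) * n) 2) t + 1) := by
      simp only [pvAOuter]
      rw [← hcast, pvInner_eq, if_neg hne]
    simp only [List.foldl_cons, hone]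
    rw [ih]
    have hrows : (List.range xs.length).map
          (fun j : Nat => pvBRow t n
            (PySem.Int.mod (c + PySem.Int.floordiv ((n - 1) * n) 2) t + 1 + (j : Int) * step))
        = (List.range xs.length).map
            (fun j : Nat => pvBRow t n (c + ((j : Int) + 1) * step)) := by
      apply List.map_congr_left
      intro j _
      simp only [pvBRow]
      apply List.map_congr_left
      intro k _
      have h1 : PySem.Int.mod (c + PySem.Int.floordiv ((n - 1) * n) 2) t + 1 + (j : Int) * step
            + PySem.Int.floordiv (k * (k + 1)) 2
          = PySem.Int.mod (c + PySem.Int.floordiv ((n - 1) * n) 2) t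
            + (1 + (j : Int) * step + PySem.Int.floordiv (k * (k + 1)) 2) := by ring
      rw [h1, pvMod_mod_add]
      congr 1
      rw [hstep]; ring
    rw [hrows, List.length_cons, List.range_succ_eq_map, List.map_cons, List.map_map]
    simp only [List.append_assoc, List.singleton_append]
    congr 1
    congr 1
    all_goals norm_num

-- ===== VERDICT (by name: the statement is the Claim_ definition above) =====
theorem create_uniform_task_map_py_spec : Claim_equal_create_uniform_task_map_py := by
  intro a t r _
  unfold Spec_create_uniform_task_map_py
  simp only [create_uniform_task_map_py, create_uniform_task_map_py_alt]
  split_ifs with ha hm hle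
  · rfl
  · rfl
  · rw [pvOuter_nil _ _ hle]
    simp
  · rw [not_le] at hle
    rw [pvOuter_eq _ _ _ rfl hle]
    congr 1
    by_cases hap : 0 < a
    · rw [show a = ((a.toNat : Int)) from (Int.toNat_of_nonneg hap.le).symm,
        PySem.List.pyRange_zero_natCast]
      simp only [List.length_map, List.length_range, List.map_map, List.nil_append]
      apply List.map_congr_left
      intro j _
      simp
    · rw [not_lt] at hap
      rw [PySem.List.pyRange_one_eq_nil hap]
      simp
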